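-- pv_equiv track=rewrite | github.com/pchelikkk/se-toolkit-hackathon | backend/app/external_recipe_client.py | _derive_flags
-- ===== SOURCE A (Python) =====
-- MEAT_WORDS = {
--     "chicken": "chicken",
--     "beef": "beef",
--     "pork": "pork",
--     "sausage": "pork",
--     "ham": "pork",
--     "bacon": "pork",
--     "mince": "mince",
--     "ground beef": "beef",
--     "lamb": "beef",
--     "turkey": "chicken",
--     "egg": "vegetarian",
--     "milk": "dairy",
--     "cheese": "dairy",
--     "cream": "dairy",
--     "butter": "dairy",
-- }
--
-- def _derive_flags(ingredients):
--     ingredient_names = " ".join(item["name"].lower() for item in ingredients)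
--
--     protein_type = "vegan"
--     is_vegetarian = True
--     is_vegan = True
--
--     for word, kind in MEAT_WORDS.items():
--         if word in ingredient_names:
--             if kind in {"chicken", "beef", "pork", "mince"}:
--                 protein_type = kind
--                 is_vegetarian = False
--                 is_vegan = False
--                 break
--             if kind == "vegetarian":
--                 protein_type = "vegetarian"
--                 is_vegan = False
--             if kind == "dairy":
--                 protein_type = "vegetarian"
--                 is_vegan = False
--
--     return protein_type, is_vegetarian, is_vegan
-- ===== SOURCE B (Python) =====
-- KEYWORD_KINDS = [
--     ("chicken", "chicken"),
--     ("beef", "beef"),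
--     ("pork", "pork"),
--     ("sausage", "pork"),
--     ("ham", "pork"),
--     ("bacon", "pork"),
--     ("mince", "mince"),
--     ("ground beef", "beef"),
--     ("lamb", "beef"),
--     ("turkey", "chicken"),
--     ("egg", "vegetarian"),
--     ("milk", "dairy"),
--     ("cheese", "dairy"),
--     ("cream", "dairy"),
--     ("butter", "dairy"),
-- ]
--
-- MEAT_KINDS = ("chicken", "beef", "pork", "mince")
--
--
-- def _derive_flags(ingredients):
--     text = " ".join(item["name"].lower() for item in ingredients)
--     # single left-to-right pass over the text: at each position record every
--     # keyword that starts there (a hand-rolled multi-pattern scan)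
--     found = set()
--     for i in range(len(text)):
--         for word, _ in KEYWORD_KINDS:
--             if text.startswith(word, i):
--                 found.add(word)
--     # classify by the highest-priority keyword that occurred
--     for word, kind in KEYWORD_KINDS:
--         if word in found:
--             if kind in MEAT_KINDS:
--                 return kind, False, False
--             return "vegetarian", True, False
--     return "vegan", True, True
-- ===== Notes on version B (the rewrite author's own statement) =====
-- stated objective: alternative
-- what changed: Instead of looping over the keyword table and asking 'word in text' for each entry, B makes one left-to-right pass over the joined text, recording at each position every keyword that starts there (a hand-rolled multi-pattern prefix scan into a set), and then classifies by the first keyword of the priority table found in that set.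
import Mathlib
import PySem

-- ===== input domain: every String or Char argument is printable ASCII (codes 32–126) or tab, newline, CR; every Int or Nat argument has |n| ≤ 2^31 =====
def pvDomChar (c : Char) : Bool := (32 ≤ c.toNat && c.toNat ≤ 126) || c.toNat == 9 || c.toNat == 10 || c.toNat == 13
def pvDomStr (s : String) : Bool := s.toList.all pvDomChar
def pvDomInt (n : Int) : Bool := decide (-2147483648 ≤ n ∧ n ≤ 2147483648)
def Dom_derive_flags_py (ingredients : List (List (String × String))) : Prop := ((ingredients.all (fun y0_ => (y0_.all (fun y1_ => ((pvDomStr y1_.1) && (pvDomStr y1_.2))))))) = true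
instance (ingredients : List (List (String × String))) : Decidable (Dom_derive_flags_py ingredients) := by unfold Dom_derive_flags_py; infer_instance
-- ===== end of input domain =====

-- B replaces A's keyword-table loop of `word in text` tests by a single left-to-right
-- pass over the joined text that records every keyword starting at each position into a
-- set, followed by one priority lookup in that set (objective: alternative).

-- shared by both ports: the identical line `" ".join(item["name"].lower() for item in ingredients)`
-- (item["name"] raises KeyError when "name" is missing; Pre_ excludes that, the .getD "" is never reached inside Pre_)
def pvJoinNames (ingredients : List (List (String × String))) : String :=
  PySem.Str.join " " (ingredients.map (fun item => PySem.Str.lower (((PySem.Dict.mk item).get? "name").getD "")))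

-- ===== PORT A =====
def pvMeatWords : List (String × String) :=
  [("chicken", "chicken"), ("beef", "beef"), ("pork", "pork"), ("sausage", "pork"),
   ("ham", "pork"), ("bacon", "pork"), ("mince", "mince"), ("ground beef", "beef"),
   ("lamb", "beef"), ("turkey", "chicken"), ("egg", "vegetarian"), ("milk", "dairy"),
   ("cheese", "dairy"), ("cream", "dairy"), ("butter", "dairy")]

-- the for-loop of A, state (protein_type, is_vegetarian, is_vegan), `break` = returning the state
def pvALoop (text : String) : List (String × String) → (String × Bool × Bool) → String × Bool × Bool
  | [], st => st
  | (word, kind) :: rest, (pt, vg, vn) =>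
    if PySem.Str.isIn word text then
      if PySem.Set.contains (PySem.Set.ofList ["chicken", "beef", "pork", "mince"]) kind then
        (kind, false, false)
      else
        let pt := if kind == "vegetarian" then "vegetarian" else pt
        let vn := if kind == "vegetarian" then false else vn
        let pt := if kind == "dairy" then "vegetarian" else pt
        let vn := if kind == "dairy" then false else vn
        pvALoop text rest (pt, vg, vn)
    else pvALoop text rest (pt, vg, vn)

def derive_flags_py (ingredients : List (List (String × String))) : String × Bool × Bool :=
  pvALoop (pvJoinNames ingredients) pvMeatWords ("vegan", true, true)

-- ===== PORT B =====
def pvTable : List (String × String) :=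
  [("chicken", "chicken"), ("beef", "beef"), ("pork", "pork"), ("sausage", "pork"),
   ("ham", "pork"), ("bacon", "pork"), ("mince", "mince"), ("ground beef", "beef"),
   ("lamb", "beef"), ("turkey", "chicken"), ("egg", "vegetarian"), ("milk", "dairy"),
   ("cheese", "dairy"), ("cream", "dairy"), ("butter", "dairy")]

def pvMeatKinds : List String := ["chicken", "beef", "pork", "mince"]

-- B's scanning pass: for each position i of the text, add every keyword that starts
-- at i (text.startswith(word, i) ported as word.toList.isPrefixOf (t.drop i), exact for 0 ≤ i ≤ len)
def pvFound (t : List Char) : PySem.Set String :=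
  (List.range t.length).foldl
    (fun acc i =>
      pvTable.foldl
        (fun acc wk => if wk.1.toList.isPrefixOf (t.drop i) then PySem.Set.add acc wk.1 else acc)
        acc)
    PySem.Set.empty

-- B's second loop: first keyword of the priority table present in `found`, early return
def pvClassify (found : PySem.Set String) : List (String × String) → String × Bool × Bool
  | [] => ("vegan", true, true)
  | (word, kind) :: rest =>
    if PySem.Set.contains found word then
      if kind ∈ pvMeatKinds then (kind, false, false) else ("vegetarian", true, false)
    else pvClassify found rest

def derive_flags_py_alt (ingredients : List (List (String × String))) : String × Bool × Bool :=
  let text := pvJoinNames ingredients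
  pvClassify (pvFound text.toList) pvTable

-- ===== PRECONDITION & SPEC =====
-- Pre_ excludes exactly the inputs where some ingredient dict has no "name" key: there A raises KeyError.
def Pre_derive_flags_py (ingredients : List (List (String × String))) : Prop :=
  (ingredients.all (fun item => ((PySem.Dict.mk item).get? "name").isSome)) = true
instance (ingredients : List (List (String × String))) : Decidable (Pre_derive_flags_py ingredients) := by unfold Pre_derive_flags_py; infer_instance

def pvWitness_derive_flags_py : (List (List (String × String))) := [[("name", "tofu")], [("name", "salt")]]

def Spec_derive_flags_py (ingredients : List (List (String × String))) (out : String × Bool × Bool) : Prop := out = derive_flags_py_alt ingredients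
instance (ingredients : List (List (String × String))) (out : String × Bool × Bool) : Decidable (Spec_derive_flags_py ingredients out) := by unfold Spec_derive_flags_py; infer_instance

-- ===== CLAIM (what is proved, stated in full; the proofs are below) =====
def Claim_equal_derive_flags_py : Prop := ∀ (ingredients : List (List (String × String))), Dom_derive_flags_py ingredients → Pre_derive_flags_py ingredients → Spec_derive_flags_py ingredients (derive_flags_py ingredients)

-- ===== LEMMAS AND PROOFS =====

-- membership after the inner fold (one text position)
theorem mem_inner (d : List Char) (tbl : List (String × String)) (acc : PySem.Set String) (w : String) :
    w ∈ tbl.foldl (fun acc wk => if wk.1.toList.isPrefixOf d then PySem.Set.add acc wk.1 else acc) acc ↔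
      w ∈ acc ∨ ∃ wk ∈ tbl, wk.1 = w ∧ wk.1.toList.isPrefixOf d := by
  induction tbl generalizing acc with
  | nil => simp
  | cons hd tl ih =>
    simp only [List.foldl_cons]
    by_cases h : hd.1.toList.isPrefixOf d
    · rw [if_pos h, ih]
      simp only [PySem.Set.mem_add, List.mem_cons]
      constructor
      · rintro (⟨hm | he⟩ | ⟨wk, hwk, h1, h2⟩)
        · exact Or.inl hm
        · exact Or.inr ⟨hd, Or.inl rfl, he.symm, h⟩
        · exact Or.inr ⟨wk, Or.inr hwk, h1, h2⟩
      · rintro (hm | ⟨wk, hwk | hwk, h1, h2⟩)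
        · exact Or.inl (Or.inl hm)
        · exact Or.inl (Or.inr (hwk ▸ h1.symm))
        · exact Or.inr ⟨wk, hwk, h1, h2⟩
    · rw [if_neg h, ih]
      simp only [List.mem_cons]
      constructor
      · rintro (hm | ⟨wk, hwk, h1, h2⟩)
        · exact Or.inl hm
        · exact Or.inr ⟨wk, Or.inr hwk, h1, h2⟩
      · rintro (hm | ⟨wk, hwk | hwk, h1, h2⟩)
        · exact Or.inl hm
        · exact absurd (hwk ▸ h2) h
        · exact Or.inr ⟨wk, hwk, h1, h2⟩

-- membership after the outer fold over all positions
theorem mem_outer (t : List Char) (rng : List Nat) (acc : PySem.Set String) (w : String) :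
    w ∈ rng.foldl
        (fun acc i =>
          pvTable.foldl
            (fun acc wk => if wk.1.toList.isPrefixOf (t.drop i) then PySem.Set.add acc wk.1 else acc)
            acc)
        acc ↔
      w ∈ acc ∨ ∃ i ∈ rng, ∃ wk ∈ pvTable, wk.1 = w ∧ wk.1.toList.isPrefixOf (t.drop i) := by
  induction rng generalizing acc with
  | nil => simp
  | cons i tl ih =>
    simp only [List.foldl_cons]
    rw [ih, mem_inner]
    simp only [List.mem_cons]
    constructor
    · rintro ((hm | ⟨wk, hwk, h1, h2⟩) | ⟨j, hj, wk, hwk, h1, h2⟩)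
      · exact Or.inl hm
      · exact Or.inr ⟨i, Or.inl rfl, wk, hwk, h1, h2⟩
      · exact Or.inr ⟨j, Or.inr hj, wk, hwk, h1, h2⟩
    · rintro (hm | ⟨j, hj | hj, wk, hwk, h1, h2⟩)
      · exact Or.inl (Or.inl hm)
      · exact Or.inl (Or.inr ⟨wk, hwk, h1, hj ▸ h2⟩)
      · exact Or.inr ⟨j, hj, wk, hwk, h1, h2⟩

-- for a nonempty table word, B's scanned set holds exactly the words with `word in text`
theorem mem_found (t : List Char) (w : String)
    (hw : ∃ k, (w, k) ∈ pvTable) (hne : w.toList ≠ []) :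
    w ∈ pvFound t ↔ PySem.Chars.isIn w.toList t = true := by
  rcases hw with ⟨k, hk⟩
  unfold pvFound
  rw [mem_outer]
  constructor
  · rintro (hm | ⟨i, _, wk, _, h1, h2⟩)
    · simp [PySem.Set.empty] at hm
    · exact (PySem.Chars.exists_prefix_drop_iff_isIn w.toList t).1
        ⟨i, h1 ▸ List.isPrefixOf_iff_prefix.mp h2⟩
  · intro h
    rcases (PySem.Chars.exists_prefix_drop_iff_isIn w.toList t).2 h with ⟨j, hj⟩
    have hjlt : j < t.length := by
      by_contra hge
      rw [List.drop_eq_nil_of_le (Nat.le_of_not_lt hge)] at hj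
      exact hne (List.prefix_nil.mp hj)
    exact Or.inr ⟨j, List.mem_range.mpr hjlt, (w, k), hk, rfl, List.isPrefixOf_iff_prefix.mpr hj⟩

-- for any joined text, A's accumulator loop and B's scan-then-classify agree
theorem pvLoop_eq (text : String) :
    pvALoop text pvMeatWords ("vegan", true, true) = pvClassify (pvFound text.toList) pvTable := by
  have m1 : ("chicken" ∈ pvFound text.toList) ↔ PySem.Chars.isIn ['c', 'h', 'i', 'c', 'k', 'e', 'n'] text.toList = true :=
    mem_found text.toList "chicken" ⟨"chicken", by simp [pvTable]⟩ (by decide)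
  have m2 : ("beef" ∈ pvFound text.toList) ↔ PySem.Chars.isIn ['b', 'e', 'e', 'f'] text.toList = true :=
    mem_found text.toList "beef" ⟨"beef", by simp [pvTable]⟩ (by decide)
  have m3 : ("pork" ∈ pvFound text.toList) ↔ PySem.Chars.isIn ['p', 'o', 'r', 'k'] text.toList = true :=
    mem_found text.toList "pork" ⟨"pork", by simp [pvTable]⟩ (by decide)
  have m4 : ("sausage" ∈ pvFound text.toList) ↔ PySem.Chars.isIn ['s', 'a', 'u', 's', 'a', 'g', 'e'] text.toList = true :=
    mem_found text.toList "sausage" ⟨"pork", by simp [pvTable]⟩ (by decide)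
  have m5 : ("ham" ∈ pvFound text.toList) ↔ PySem.Chars.isIn ['h', 'a', 'm'] text.toList = true :=
    mem_found text.toList "ham" ⟨"pork", by simp [pvTable]⟩ (by decide)
  have m6 : ("bacon" ∈ pvFound text.toList) ↔ PySem.Chars.isIn ['b', 'a', 'c', 'o', 'n'] text.toList = true :=
    mem_found text.toList "bacon" ⟨"pork", by simp [pvTable]⟩ (by decide)
  have m7 : ("mince" ∈ pvFound text.toList) ↔ PySem.Chars.isIn ['m', 'i', 'n', 'c', 'e'] text.toList = true :=
    mem_found text.toList "mince" ⟨"mince", by simp [pvTable]⟩ (by decide)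
  have m8 : ("ground beef" ∈ pvFound text.toList) ↔ PySem.Chars.isIn ['g', 'r', 'o', 'u', 'n', 'd', ' ', 'b', 'e', 'e', 'f'] text.toList = true :=
    mem_found text.toList "ground beef" ⟨"beef", by simp [pvTable]⟩ (by decide)
  have m9 : ("lamb" ∈ pvFound text.toList) ↔ PySem.Chars.isIn ['l', 'a', 'm', 'b'] text.toList = true :=
    mem_found text.toList "lamb" ⟨"beef", by simp [pvTable]⟩ (by decide)
  have m10 : ("turkey" ∈ pvFound text.toList) ↔ PySem.Chars.isIn ['t', 'u', 'r', 'k', 'e', 'y'] text.toList = true :=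
    mem_found text.toList "turkey" ⟨"chicken", by simp [pvTable]⟩ (by decide)
  have m11 : ("egg" ∈ pvFound text.toList) ↔ PySem.Chars.isIn ['e', 'g', 'g'] text.toList = true :=
    mem_found text.toList "egg" ⟨"vegetarian", by simp [pvTable]⟩ (by decide)
  have m12 : ("milk" ∈ pvFound text.toList) ↔ PySem.Chars.isIn ['m', 'i', 'l', 'k'] text.toList = true :=
    mem_found text.toList "milk" ⟨"dairy", by simp [pvTable]⟩ (by decide)
  have m13 : ("cheese" ∈ pvFound text.toList) ↔ PySem.Chars.isIn ['c', 'h', 'e', 'e', 's', 'e'] text.toList = true :=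
    mem_found text.toList "cheese" ⟨"dairy", by simp [pvTable]⟩ (by decide)
  have m14 : ("cream" ∈ pvFound text.toList) ↔ PySem.Chars.isIn ['c', 'r', 'e', 'a', 'm'] text.toList = true :=
    mem_found text.toList "cream" ⟨"dairy", by simp [pvTable]⟩ (by decide)
  have m15 : ("butter" ∈ pvFound text.toList) ↔ PySem.Chars.isIn ['b', 'u', 't', 't', 'e', 'r'] text.toList = true :=
    mem_found text.toList "butter" ⟨"dairy", by simp [pvTable]⟩ (by decide)
  simp only [pvMeatWords, pvTable]
  by_cases h1 : PySem.Chars.isIn ['c', 'h', 'i', 'c', 'k', 'e', 'n'] text.toList = true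
  · simp [pvALoop, pvClassify, pvMeatKinds, m1, m2, m3, m4, m5, m6, m7, m8, m9, m10, m11, m12, m13, m14, m15, h1]
  by_cases h2 : PySem.Chars.isIn ['b', 'e', 'e', 'f'] text.toList = true
  · simp [pvALoop, pvClassify, pvMeatKinds, m1, m2, m3, m4, m5, m6, m7, m8, m9, m10, m11, m12, m13, m14, m15, h1, h2]
  by_cases h3 : PySem.Chars.isIn ['p', 'o', 'r', 'k'] text.toList = true
  · simp [pvALoop, pvClassify, pvMeatKinds, m1, m2, m3, m4, m5, m6, m7, m8, m9, m10, m11, m12, m13, m14, m15, h1, h2, h3]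
  by_cases h4 : PySem.Chars.isIn ['s', 'a', 'u', 's', 'a', 'g', 'e'] text.toList = true
  · simp [pvALoop, pvClassify, pvMeatKinds, m1, m2, m3, m4, m5, m6, m7, m8, m9, m10, m11, m12, m13, m14, m15, h1, h2, h3, h4]
  by_cases h5 : PySem.Chars.isIn ['h', 'a', 'm'] text.toList = true
  · simp [pvALoop, pvClassify, pvMeatKinds, m1, m2, m3, m4, m5, m6, m7, m8, m9, m10, m11, m12, m13, m14, m15, h1, h2, h3, h4, h5]
  by_cases h6 : PySem.Chars.isIn ['b', 'a', 'c', 'o', 'n'] text.toList = true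
  · simp [pvALoop, pvClassify, pvMeatKinds, m1, m2, m3, m4, m5, m6, m7, m8, m9, m10, m11, m12, m13, m14, m15, h1, h2, h3, h4, h5, h6]
  by_cases h7 : PySem.Chars.isIn ['m', 'i', 'n', 'c', 'e'] text.toList = true
  · simp [pvALoop, pvClassify, pvMeatKinds, m1, m2, m3, m4, m5, m6, m7, m8, m9, m10, m11, m12, m13, m14, m15, h1, h2, h3, h4, h5, h6, h7]
  by_cases h8 : PySem.Chars.isIn ['g', 'r', 'o', 'u', 'n', 'd', ' ', 'b', 'e', 'e', 'f'] text.toList = true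
  · simp [pvALoop, pvClassify, pvMeatKinds, m1, m2, m3, m4, m5, m6, m7, m8, m9, m10, m11, m12, m13, m14, m15, h1, h2, h3, h4, h5, h6, h7, h8]
  by_cases h9 : PySem.Chars.isIn ['l', 'a', 'm', 'b'] text.toList = true
  · simp [pvALoop, pvClassify, pvMeatKinds, m1, m2, m3, m4, m5, m6, m7, m8, m9, m10, m11, m12, m13, m14, m15, h1, h2, h3, h4, h5, h6, h7, h8, h9]
  by_cases h10 : PySem.Chars.isIn ['t', 'u', 'r', 'k', 'e', 'y'] text.toList = true
  · simp [pvALoop, pvClassify, pvMeatKinds, m1, m2, m3, m4, m5, m6, m7, m8, m9, m10, m11, m12, m13, m14, m15, h1, h2, h3, h4, h5, h6, h7, h8, h9, h10]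
  simp [pvALoop, pvClassify, pvMeatKinds, m1, m2, m3, m4, m5, m6, m7, m8, m9, m10, m11, m12, m13, m14, m15, h1, h2, h3, h4, h5, h6, h7, h8, h9, h10]


-- ===== VERDICT (by name: the statement is the Claim_ definition above) =====
theorem derive_flags_py_spec : Claim_equal_derive_flags_py := by
  intro ingredients _ _
  unfold Spec_derive_flags_py derive_flags_py derive_flags_py_alt
  exact pvLoop_eq (pvJoinNames ingredients)
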